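-- pv_equiv track=rewrite | github.com/FlyingCurryMonster/lseg-data-fetch | dividend_derivatives/download_div_futures.py | build_output_header
-- ===== SOURCE A (Python) =====
-- PREFERRED_FIELDS = [
--     "TRDPRC_1",
--     "OPEN_PRC",
--     "HIGH_1",
--     "LOW_1",
--     "ACVOL_UNS",
--     "BID",
--     "ASK",
--     "OPINT_1",
--     "TOTCNTRVOL",
--     "TOTCNTROI",
--     "SETTLE",
--     "IMP_YIELD",
--     "EDSP",
--     "NUM_MOVES",
--     "VWAP",
--     "ORDBK_VOL",
--     "OFFBK_VOL",
--     "MID_PRICE",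
--     "EXPIR_DATE",
--     "CRT_MNTH",
--     "SETL_PCHNG",
--     "SETL_NCHNG",
-- ]
--
-- def build_output_header(discovered_fields: list[str]) -> list[str]:
--     seen = set()
--     normalized = []
--     for field in discovered_fields:
--         if field and field != "RIC" and field not in seen:
--             normalized.append(field)
--             seen.add(field)
--
--     header = ["date"]
--     for field in PREFERRED_FIELDS:
--         if field in seen:
--             header.append(field)
--
--     extras = sorted(field for field in normalized if field != "date" and field not in PREFERRED_FIELDS)
--     header.extend(extras)
--     header.append("RIC")
--     return header
-- ===== SOURCE B (Python) =====
-- PREFERRED_FIELDS = [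
--     "TRDPRC_1", "OPEN_PRC", "HIGH_1", "LOW_1", "ACVOL_UNS", "BID", "ASK",
--     "OPINT_1", "TOTCNTRVOL", "TOTCNTROI", "SETTLE", "IMP_YIELD", "EDSP",
--     "NUM_MOVES", "VWAP", "ORDBK_VOL", "OFFBK_VOL", "MID_PRICE", "EXPIR_DATE",
--     "CRT_MNTH", "SETL_PCHNG", "SETL_NCHNG",
-- ]
--
-- def build_output_header(discovered_fields: list[str]) -> list[str]:
--     rank = {f: i for i, f in enumerate(PREFERRED_FIELDS)}
--     deduped = dict.fromkeys(f for f in discovered_fields if f and f != "RIC")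
--     pref = sorted((f for f in deduped if f in rank), key=rank.__getitem__)
--     extras = sorted(f for f in deduped if f != "date" and f not in rank)
--     return ["date", *pref, *extras, "RIC"]
-- ===== Notes on version B (the rewrite author's own statement) =====
-- stated objective: idiomatic
-- what changed: Replaces A's seen-set accumulation loop and its template scan over PREFERRED_FIELDS with a rank dict, a dict.fromkeys ordered dedup, and one keyed sort of the present preferred fields (plus the alphabetical sort of the extras), assembled in a single return.
import Mathlib
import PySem

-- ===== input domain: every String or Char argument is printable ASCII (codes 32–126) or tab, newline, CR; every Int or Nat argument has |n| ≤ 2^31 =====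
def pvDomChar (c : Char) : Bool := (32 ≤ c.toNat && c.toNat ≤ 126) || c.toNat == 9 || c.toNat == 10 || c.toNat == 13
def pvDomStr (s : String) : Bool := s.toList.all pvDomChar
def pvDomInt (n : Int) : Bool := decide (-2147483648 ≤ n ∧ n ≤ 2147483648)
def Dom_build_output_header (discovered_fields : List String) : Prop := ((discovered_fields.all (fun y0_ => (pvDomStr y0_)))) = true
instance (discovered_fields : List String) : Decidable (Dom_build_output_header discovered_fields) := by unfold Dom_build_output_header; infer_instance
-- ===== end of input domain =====

-- B replaces A's seen-set loop + template scan over PREFERRED_FIELDS by a rank dict, one ordered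
-- dedup and one keyed sort of the present preferred fields (objective: idiomatic; similar cost).

def PREFERRED_FIELDS : List String :=
  ["TRDPRC_1", "OPEN_PRC", "HIGH_1", "LOW_1", "ACVOL_UNS", "BID", "ASK",
   "OPINT_1", "TOTCNTRVOL", "TOTCNTROI", "SETTLE", "IMP_YIELD", "EDSP",
   "NUM_MOVES", "VWAP", "ORDBK_VOL", "OFFBK_VOL", "MID_PRICE", "EXPIR_DATE",
   "CRT_MNTH", "SETL_PCHNG", "SETL_NCHNG"]

-- ===== PORT A =====
def build_output_header (discovered_fields : List String) : List String :=
  -- seen = set(); normalized = []; for field in discovered_fields: …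
  let sn : PySem.Set String × List String :=
    discovered_fields.foldl
      (fun p field =>
        if (!(field == "") && (!(field == "RIC") && !(PySem.Set.contains p.1 field))) = true then
          (PySem.Set.add p.1 field, p.2 ++ [field])
        else p)
      (PySem.Set.empty, [])
  let seen := sn.1
  let normalized := sn.2
  -- header = ["date"]; for field in PREFERRED_FIELDS: if field in seen: header.append(field)
  let header : List String :=
    PREFERRED_FIELDS.foldl
      (fun acc field => if PySem.Set.contains seen field = true then acc ++ [field] else acc)
      ["date"]
  -- extras = sorted(field for field in normalized if field != "date" and field not in PREFERRED_FIELDS)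
  let extras : List String :=
    PySem.List.sorted
      (normalized.filter (fun field => !(field == "date") && !(PREFERRED_FIELDS.contains field)))
      (fun f => f)
  (header ++ extras) ++ ["RIC"]

-- ===== PORT B =====
-- rank = {f: i for i, f in enumerate(PREFERRED_FIELDS)}
def pvRank : PySem.Dict String Int :=
  (PySem.List.enumerate PREFERRED_FIELDS).foldl (fun d p => d.insert p.2 p.1) PySem.Dict.empty

def build_output_header_alt (discovered_fields : List String) : List String :=
  -- deduped = dict.fromkeys(f for f in discovered_fields if f and f != "RIC")
  let deduped : List String :=
    PySem.List.dedup (discovered_fields.filter (fun f => !(f == "") && !(f == "RIC")))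
  -- pref = sorted((f for f in deduped if f in rank), key=rank.__getitem__)
  -- rank.__getitem__ never raises here (the filter keeps only keys of rank), so .getD 0 is exact
  let pref : List String :=
    PySem.List.sorted (deduped.filter (fun f => pvRank.contains f))
      (fun f => (pvRank.get? f).getD 0)
  -- extras = sorted(f for f in deduped if f != "date" and f not in rank)
  let extras : List String :=
    PySem.List.sorted (deduped.filter (fun f => !(f == "date") && !(pvRank.contains f)))
      (fun f => f)
  "date" :: (pref ++ extras ++ ["RIC"])

-- ===== PRECONDITION & SPEC =====
def Spec_build_output_header (discovered_fields : List String) (out : List String) : Prop := out = build_output_header_alt discovered_fields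
instance (discovered_fields : List String) (out : List String) : Decidable (Spec_build_output_header discovered_fields out) := by unfold Spec_build_output_header; infer_instance

-- ===== CLAIM (what is proved, stated in full; the proofs are below) =====
def Claim_equal_build_output_header : Prop := ∀ (discovered_fields : List String), Dom_build_output_header discovered_fields → Spec_build_output_header discovered_fields (build_output_header discovered_fields)

-- ===== LEMMAS AND PROOFS =====

-- pvRank evaluated to the literal association list
set_option maxHeartbeats 1000000 in
theorem pv_rank_eval : pvRank = PySem.Dict.mk [("TRDPRC_1",0),("OPEN_PRC",1),("HIGH_1",2),("LOW_1",3),("ACVOL_UNS",4),("BID",5),("ASK",6),("OPINT_1",7),("TOTCNTRVOL",8),("TOTCNTROI",9),("SETTLE",10),("IMP_YIELD",11),("EDSP",12),("NUM_MOVES",13),("VWAP",14),("ORDBK_VOL",15),("OFFBK_VOL",16),("MID_PRICE",17),("EXPIR_DATE",18),("CRT_MNTH",19),("SETL_PCHNG",20),("SETL_NCHNG",21)] := by decide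

-- membership in the rank dict is membership in PREFERRED_FIELDS
set_option maxHeartbeats 1000000 in
theorem pv_rank_contains (f : String) : pvRank.contains f = PREFERRED_FIELDS.contains f := by
  rw [pv_rank_eval, Bool.eq_iff_iff]
  simp [PREFERRED_FIELDS]
  tauto

theorem pv_pf_nodup : PREFERRED_FIELDS.Nodup := by decide

-- the rank key is strictly increasing along PREFERRED_FIELDS
set_option maxHeartbeats 1000000 in
theorem pv_rank_pairwise :
    PREFERRED_FIELDS.Pairwise (fun a b => (pvRank.get? a).getD 0 < (pvRank.get? b).getD 0) := by
  decide

-- A's combined loop over (seen, normalized): from the duplicated state (s, s) both components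
-- stay equal and are the Set.add fold over the kept fields.
theorem pv_loop_pair (ds : List String) (s : PySem.Set String) :
    ds.foldl
      (fun (p : PySem.Set String × List String) field =>
        if (!(field == "") && (!(field == "RIC") && !(PySem.Set.contains p.1 field))) = true then
          (PySem.Set.add p.1 field, p.2 ++ [field])
        else p)
      (s, s)
    = ((ds.filter (fun f => !(f == "") && !(f == "RIC"))).foldl PySem.Set.add s,
       (ds.filter (fun f => !(f == "") && !(f == "RIC"))).foldl PySem.Set.add s) := by
  induction ds generalizing s with
  | nil => rfl
  | cons x t ih =>
    rw [List.foldl_cons, List.filter_cons]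
    by_cases h1 : x = ""
    · rw [if_neg (by simp [h1]), if_neg (by simp [h1])]
      exact ih s
    by_cases h2 : x = "RIC"
    · rw [if_neg (by simp [h2]), if_neg (by simp [h2])]
      exact ih s
    have hq : (!(x == "") && !(x == "RIC")) = true := by simp [h1, h2]
    rw [hq, if_pos rfl, List.foldl_cons]
    by_cases hc : x ∈ s
    · have hcond : ¬((!(x == "") && (!(x == "RIC") && !(PySem.Set.contains s x))) = true) := by
        simp [PySem.Set.contains, hc]
      rw [if_neg hcond]
      have hadd : PySem.Set.add s x = s := by
        simp [PySem.Set.add, PySem.Set.contains, hc]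
      rw [hadd]
      exact ih s
    · have hcond : (!(x == "") && (!(x == "RIC") && !(PySem.Set.contains s x))) = true := by
        simp [PySem.Set.contains, h1, h2, hc]
      rw [if_pos hcond]
      have hadd : PySem.Set.add s x = s ++ [x] := by
        simp [PySem.Set.add, PySem.Set.contains, hc]
      dsimp only
      rw [← hadd]
      exact ih (PySem.Set.add s x)

-- the loop started from the empty state computes the ordered dedup of the kept fields, twice
theorem pv_loop_pair0 (ds : List String) :
    ds.foldl
      (fun (p : PySem.Set String × List String) field =>
        if (!(field == "") && (!(field == "RIC") && !(PySem.Set.contains p.1 field))) = true then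
          (PySem.Set.add p.1 field, p.2 ++ [field])
        else p)
      (PySem.Set.empty, [])
    = (PySem.List.dedup (ds.filter (fun f => !(f == "") && !(f == "RIC"))),
       PySem.List.dedup (ds.filter (fun f => !(f == "") && !(f == "RIC")))) := by
  have h := pv_loop_pair ds PySem.Set.empty
  rw [PySem.List.dedup_eq_ofList, PySem.Set.ofList_eq_foldl]
  exact h

-- B's keyed sort of the present preferred fields IS A's template scan over PREFERRED_FIELDS
theorem pv_pref (N : List String) (hN : N.Nodup) :
    PySem.List.sorted (N.filter (fun f => pvRank.contains f)) (fun f => (pvRank.get? f).getD 0)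
      = PREFERRED_FIELDS.filter (fun f => PySem.Set.contains N f) := by
  apply PySem.List.sorted_eq_of_perm_of_pairwise_lt
  · apply (List.perm_ext_iff_of_nodup (pv_pf_nodup.filter _) (hN.filter _)).mpr
    intro a
    simp [List.mem_filter, PySem.Set.contains, pv_rank_contains]
    tauto
  · exact pv_rank_pairwise.filter _

-- the two extras filters agree pointwise
theorem pv_extras (N : List String) :
    N.filter (fun f => !(f == "date") && !(PREFERRED_FIELDS.contains f))
      = N.filter (fun f => !(f == "date") && !(pvRank.contains f)) :=
  List.filter_congr (fun a _ => by rw [pv_rank_contains])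

theorem build_output_header_spec : Claim_equal_build_output_header := by
  intro ds _
  show build_output_header ds = build_output_header_alt ds
  simp only [build_output_header, build_output_header_alt]
  rw [pv_loop_pair0]
  dsimp only
  rw [PySem.List.foldl_append_if_eq_filter, pv_pref _ (PySem.List.nodup_dedup _), pv_extras]
  simp only [List.append_assoc, List.cons_append, List.nil_append]
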